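-- pv_equiv track=rewrite | github.com/Evyatar-Hazan/weather-sense | utils/security.py | _is_safe_html_content
-- ===== SOURCE A (Python) =====
-- def _is_safe_html_content(content: str) -> bool:
--     """Check if HTML-like content is safe."""
--     # Very basic check - in production, use a proper HTML sanitizer
--     dangerous_tags = [
--         "script",
--         "iframe",
--         "object",
--         "embed",
--         "applet",
--         "link",
--         "meta",
--     ]
--     content_lower = content.lower()
--
--     for tag in dangerous_tags:
--         if f"<{tag}" in content_lower:
--             return False
--
--     return True
-- ===== SOURCE B (Python) =====
-- def _is_safe_html_content(content: str) -> bool: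
--     """Check if HTML-like content is safe."""
--     dangerous_tags = (
--         "script",
--         "iframe",
--         "object",
--         "embed",
--         "applet",
--         "link",
--         "meta",
--     )
--     content_lower = content.lower()
--     for i, ch in enumerate(content_lower):
--         if ch == "<" and content_lower.startswith(dangerous_tags, i + 1):
--             return False
--     return True
-- ===== Notes on version B (the rewrite author's own statement) =====
-- stated objective: alternative
-- what changed: Replaced seven independent substring scans (one per dangerous tag) by a single left-to-right pass over the lowercased text that checks, only at opening-angle-bracket positions, whether any dangerous tag name follows (tuple startswith).
import Mathlib
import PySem

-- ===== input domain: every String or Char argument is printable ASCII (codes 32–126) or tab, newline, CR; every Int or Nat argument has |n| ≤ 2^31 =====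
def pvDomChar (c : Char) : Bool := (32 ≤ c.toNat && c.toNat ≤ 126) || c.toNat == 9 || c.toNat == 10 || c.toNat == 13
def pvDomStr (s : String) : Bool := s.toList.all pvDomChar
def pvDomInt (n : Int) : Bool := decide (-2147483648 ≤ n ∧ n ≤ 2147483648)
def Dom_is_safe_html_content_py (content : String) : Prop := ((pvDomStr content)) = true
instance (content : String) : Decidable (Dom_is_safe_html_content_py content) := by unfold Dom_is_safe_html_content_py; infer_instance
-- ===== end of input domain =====

-- ===== PORT A =====
-- B changes A's seven per-tag substring scans into one left-to-right pass checking tags only at tag-opening positions.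
-- A: for tag in dangerous_tags: if f"<{tag}" in content_lower: return False  (early-return loop over tags)
def pvTags : List (List Char) :=
  [['s','c','r','i','p','t'], ['i','f','r','a','m','e'], ['o','b','j','e','c','t'],
   ['e','m','b','e','d'], ['a','p','p','l','e','t'], ['l','i','n','k'], ['m','e','t','a']]

def pvALoop (tags : List (List Char)) (lower : List Char) : Bool :=
  match tags with
  | [] => true
  | t :: ts => if PySem.Chars.isIn ('<' :: t) lower then false else pvALoop ts lower

def is_safe_html_content_py (content : String) : Bool :=
  pvALoop pvTags (PySem.Chars.lower content.toList)

-- ===== PORT B =====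
-- B: for i, ch in enumerate(content_lower): if ch == '<' and content_lower.startswith(tags, i+1): return False
--    (one scan over positions; 'startswith(tuple, i+1)' = any tag is a prefix of the rest)
def pvBScan (lower : List Char) : Bool :=
  match lower with
  | [] => true
  | c :: rest =>
      if c == '<' && pvTags.any (fun t => PySem.Chars.startswith rest t) then false
      else pvBScan rest

def is_safe_html_content_py_alt (content : String) : Bool :=
  pvBScan (PySem.Chars.lower content.toList)

-- ===== PRECONDITION & SPEC =====
def Spec_is_safe_html_content_py (content : String) (out : Bool) : Prop := out = is_safe_html_content_py_alt content
instance (content : String) (out : Bool) : Decidable (Spec_is_safe_html_content_py content out) := by unfold Spec_is_safe_html_content_py; infer_instance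

-- ===== CLAIM (what is proved, stated in full; the proofs are below) =====
def Claim_equal_is_safe_html_content_py : Prop := ∀ (content : String), Dom_is_safe_html_content_py content → Spec_is_safe_html_content_py content (is_safe_html_content_py content)

-- ===== LEMMAS AND PROOFS =====
-- characterisation of A's early-return loop: true iff no "<tag" occurs
theorem pvALoop_eq_all (tags : List (List Char)) (l : List Char) :
    pvALoop tags l = tags.all (fun t => !(PySem.Chars.isIn ('<' :: t) l)) := by
  induction tags with
  | nil => rfl
  | cons t ts ih =>
      simp only [pvALoop, List.all_cons, ih]
      by_cases h : PySem.Chars.isIn ('<' :: t) l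
      · simp [h]
      · simp [h]

-- B's single scan computes the same "no '<tag' anywhere" predicate
theorem pvBScan_eq_all (l : List Char) :
    pvBScan l = pvTags.all (fun t => !(PySem.Chars.isIn ('<' :: t) l)) := by
  induction l with
  | nil => decide
  | cons c rest ih =>
      simp only [pvBScan]
      by_cases hc : c = '<'
      · subst hc
        by_cases h : pvTags.any (fun t => PySem.Chars.startswith rest t)
        · simp only [h, Bool.and_true, beq_self_eq_true, if_true]
          rw [List.any_eq_true] at h
          obtain ⟨t, ht, hsw⟩ := h
          rw [PySem.Chars.startswith_iff] at hsw
          have hin : PySem.Chars.isIn ('<' :: t) ('<' :: rest) = true := by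
            rw [PySem.Chars.isIn_iff_infix]
            exact ((List.cons_prefix_cons.mpr ⟨rfl, hsw⟩).isInfix)
          symm
          rw [List.all_eq_false]
          exact ⟨t, ht, by simp [hin]⟩
        · rw [Bool.not_eq_true] at h
          simp only [h, Bool.and_false, Bool.false_eq_true, if_false, ih]
          rw [Bool.eq_iff_iff, List.all_eq_true, List.all_eq_true]
          refine forall_congr' fun t => imp_congr_right fun ht => ?_
          have key : PySem.Chars.isIn ('<' :: t) rest = PySem.Chars.isIn ('<' :: t) ('<' :: rest) := by
            rw [Bool.eq_iff_iff, PySem.Chars.isIn_iff_infix, PySem.Chars.isIn_iff_infix,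
                List.infix_cons_iff]
            constructor
            · exact Or.inr
            · rintro (hp | hi)
              · exfalso
                obtain ⟨-, hpre⟩ := List.cons_prefix_cons.mp hp
                rw [List.any_eq_false] at h
                have hsw : PySem.Chars.startswith rest t = true := (PySem.Chars.startswith_iff _ _).mpr hpre
                simp [h t ht] at hsw
              · exact hi
          rw [key]
      · have hne : (c == '<') = false := by simp [hc]
        simp only [hne, Bool.false_and, Bool.false_eq_true, if_false, ih]
        refine List.all_congr rfl fun t => ?_
        have key : PySem.Chars.isIn ('<' :: t) rest = PySem.Chars.isIn ('<' :: t) (c :: rest) := by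
          rw [Bool.eq_iff_iff, PySem.Chars.isIn_iff_infix, PySem.Chars.isIn_iff_infix,
              List.infix_cons_iff]
          constructor
          · exact Or.inr
          · rintro (hp | hi)
            · exact absurd (List.cons_prefix_cons.mp hp).1.symm hc
            · exact hi
        rw [key]

-- ===== VERDICT (by name: the statement is the Claim_ definition above) =====
theorem is_safe_html_content_py_spec : Claim_equal_is_safe_html_content_py := by
  intro content _
  unfold Spec_is_safe_html_content_py is_safe_html_content_py is_safe_html_content_py_alt
  rw [pvALoop_eq_all, pvBScan_eq_all]
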